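-- pv_equiv track=rewrite | github.com/Calder-Ty/aoc_2023 | day12/__main__.py | get_valid_first_ends
-- ===== SOURCE A (Python) =====
-- import collections
-- import itertools
--
-- WORKING = '.'
--
-- DAMAGED = '#'
--
-- UNKNOWN = '?'
--
-- def get_valid_first_ends(seq: str, n: int):
--     if len(seq) == n:
--         if all([c in (UNKNOWN, DAMAGED) for c in seq]):
--             yield len(seq)
--     else:
--         if (i := seq.find(DAMAGED)) == -1:
--             index = len(seq)
--         else:
--             index = i + n
--
--         if len(seq) <= index:
--             seq += WORKING
--         # [('?', '?'), ('?', '?'), ('?', '?'), ('?', '?'), ('?', '#'), ('#', '?')]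
--         for i, s in enumerate(list(sliding_window(seq[:index+1], n=n+1))):
--             if all([_ in (UNKNOWN, DAMAGED) for _ in s[:-1]]) and s[-1] != DAMAGED:
--                 # Valid group
--                 yield i + n + 1
--
-- def sliding_window(iterable, n):
--     """Yoinked from itertools cookbook"""
--     # sliding_window('ABCDEFG', 4) --> ABCD BCDE CDEF DEFG
--     it = iter(iterable)
--     window = collections.deque(itertools.islice(it, n-1), maxlen=n)
--     for x in it:
--         window.append(x)
--         yield tuple(window)
-- ===== SOURCE B (Python) =====
-- def get_valid_first_ends(seq: str, n: int):
--     """One pass with a running count of consecutive '?'/'#' chars, instead of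
--     materialising sliding windows and rescanning each one."""
--     L = len(seq)
--     if L == n:
--         if all(c in '?#' for c in seq):
--             yield n
--         return
--     f = seq.find('#')
--     index = L if f == -1 else f + n
--     m = min(index + 1, L + 1)
--     run = 0
--     for j in range(m):
--         c = seq[j] if j < L else '.'
--         if j >= n and run >= n and c != '#':
--             yield j + 1
--         run = run + 1 if c in '?#' else 0
-- ===== Notes on version B (the rewrite author's own statement) =====
-- stated objective: faster
-- what changed: B replaces A's materialised sliding windows (each window rescanned with all(...), O(index*n)) by a single left-to-right pass that keeps a running count of consecutive '?'/'#' characters and emits an end position whenever the run reaches n and the next character is not '#'.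
import Mathlib
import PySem

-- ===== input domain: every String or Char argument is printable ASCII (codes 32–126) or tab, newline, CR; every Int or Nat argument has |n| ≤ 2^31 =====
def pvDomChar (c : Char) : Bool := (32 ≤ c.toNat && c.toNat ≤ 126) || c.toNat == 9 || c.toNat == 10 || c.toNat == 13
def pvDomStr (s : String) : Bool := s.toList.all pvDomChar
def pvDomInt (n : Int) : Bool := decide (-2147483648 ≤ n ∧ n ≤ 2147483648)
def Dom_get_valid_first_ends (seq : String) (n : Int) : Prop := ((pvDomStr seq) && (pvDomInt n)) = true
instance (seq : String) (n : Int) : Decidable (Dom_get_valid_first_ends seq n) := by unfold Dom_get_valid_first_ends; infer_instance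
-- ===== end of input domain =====

-- B replaces A's materialised sliding windows (each rescanned with `all`) by a single
-- left-to-right pass keeping a running count of consecutive '?'/'#' characters: faster.
-- Both are ports of generators; the List Int is the list of yielded values.

-- ===== PORT A =====
-- helper: itertools-cookbook sliding_window, deque with maxlen = k keeps the last k chars
def pvSlidingWindowAux (k : Nat) (w : List Char) : List Char → List (List Char)
  | [] => []
  | x :: rest =>
    let w' := (w ++ [x]).drop ((w ++ [x]).length - k)
    w' :: pvSlidingWindowAux k w' rest

def pvSlidingWindow (l : List Char) (k : Nat) : List (List Char) :=
  pvSlidingWindowAux k (l.take (k - 1)) (l.drop (k - 1))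

-- A collects `yield`s into the result list.  `(n+1).toNat`: Python raises ValueError in
-- islice for n < 0 (excluded by Pre_), so the window size n+1 is a genuine Nat there.
def get_valid_first_ends (seq : String) (n : Int) : List Int :=
  let cs := seq.toList
  if (cs.length : Int) = n then
    if cs.all (fun c => c == '?' || c == '#') then [(cs.length : Int)] else []
  else
    let i := PySem.Str.find seq "#"
    let index : Int := if i = -1 then (cs.length : Int) else i + n
    let cs2 := if (cs.length : Int) ≤ index then cs ++ ['.'] else cs
    let s := PySem.List.slice cs2 none (some (index + 1))
    (PySem.List.enumerate (pvSlidingWindow s ((n + 1).toNat))).foldl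
      (fun acc iw =>
        if (iw.2.dropLast.all (fun c => c == '?' || c == '#')
            && (PySem.List.pyGetD iw.2 (-1) ' ' != '#')) then
          acc ++ [iw.1 + n + 1]
        else acc) []

-- ===== PORT B =====
def get_valid_first_ends_alt (seq : String) (n : Int) : List Int :=
  let cs := seq.toList
  let L : Int := cs.length
  if L = n then
    if cs.all (fun c => c == '?' || c == '#') then [n] else []
  else
    let f := PySem.Str.find seq "#"
    let index : Int := if f = -1 then L else f + n
    let m := min (index + 1) (L + 1)
    ((PySem.List.pyRange 0 m 1).foldl
      (fun st j =>
        let c : Char := if j < L then PySem.List.pyGetD cs j ' ' else '.'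
        let acc := if n ≤ j && n ≤ st.1 && c != '#' then st.2 ++ [j + 1] else st.2
        ((if c == '?' || c == '#' then st.1 + 1 else 0), acc))
      ((0 : Int), ([] : List Int))).2

-- ===== PRECONDITION & SPEC =====
-- Python A raises ValueError (itertools.islice with a negative count) for n < 0.
def Pre_get_valid_first_ends (seq : String) (n : Int) : Prop := 0 ≤ n
instance (seq : String) (n : Int) : Decidable (Pre_get_valid_first_ends seq n) := by
  unfold Pre_get_valid_first_ends; infer_instance

def pvWitness_get_valid_first_ends : String × Int := ("?#?.", 2)

def Spec_get_valid_first_ends (seq : String) (n : Int) (out : List Int) : Prop := out = get_valid_first_ends_alt seq n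
instance (seq : String) (n : Int) (out : List Int) : Decidable (Spec_get_valid_first_ends seq n out) := by unfold Spec_get_valid_first_ends; infer_instance

-- ===== CLAIM (what is proved, stated in full; the proofs are below) =====
def Claim_equal_get_valid_first_ends : Prop := ∀ (seq : String) (n : Int), Dom_get_valid_first_ends seq n → Pre_get_valid_first_ends seq n → Spec_get_valid_first_ends seq n (get_valid_first_ends seq n)

-- ===== LEMMAS AND PROOFS =====

-- the membership test both programs use: c in ('?', '#')
def pvGood (c : Char) : Bool := c == '?' || c == '#'

-- B's running count after consuming p: length of the longest all-good suffix of p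
def pvRun (p : List Char) : Nat := (p.reverse.takeWhile pvGood).length

-- canonical description of the yielded ends over l = (seq + '.')[:index+1]
def pvCond (l : List Char) (N : Nat) (j : Nat) : Bool :=
  decide (N ≤ j) && ((l.drop (j - N)).take N).all pvGood && (l.getD j ' ' != '#')

def pvCanon (l : List Char) (N : Nat) : List Int :=
  ((List.range l.length).filter (pvCond l N)).map (fun j : Nat => (j : Int) + 1)

-- keep-last-k as reverse/take
lemma pvRtakeEq (l : List Char) (k : Nat) :
    l.drop (l.length - k) = (l.reverse.take k).reverse := by
  rw [List.reverse_take]; simp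

lemma pvTakeAppendTake (x y : List Char) (k : Nat) :
    (x ++ y.take k).take k = (x ++ y).take k := by
  rw [List.take_append, List.take_append, List.take_take]
  congr 2
  omega

lemma pvRtakeIdem (a b : List Char) (k : Nat) :
    (a.drop (a.length - k) ++ b).drop ((a.drop (a.length - k) ++ b).length - k)
      = (a ++ b).drop ((a ++ b).length - k) := by
  rw [pvRtakeEq a k, pvRtakeEq, pvRtakeEq (a ++ b)]
  rw [List.reverse_append, List.reverse_reverse, List.reverse_append]
  rw [pvTakeAppendTake]

lemma pvSWA (k : Nat) (rest : List Char) : ∀ (w : List Char),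
    pvSlidingWindowAux k w rest
      = (List.range rest.length).map
          (fun i => (w ++ rest.take (i + 1)).drop ((w ++ rest.take (i + 1)).length - k)) := by
  induction rest with
  | nil => intro w; simp [pvSlidingWindowAux]
  | cons x rs ih =>
    intro w
    simp only [pvSlidingWindowAux, ih]
    rw [List.length_cons, List.range_succ_eq_map]
    simp only [List.map_cons, List.map_map]
    refine List.cons_eq_cons.mpr ⟨by simp, ?_⟩
    apply List.map_congr_left
    intro i _
    simp only [Function.comp_apply, Nat.succ_eq_add_one, List.take_succ_cons]
    rw [show w ++ x :: rs.take (i + 1) = (w ++ [x]) ++ rs.take (i + 1) by simp]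
    exact pvRtakeIdem (w ++ [x]) (rs.take (i + 1)) k

lemma pvWindows (l : List Char) (K : Nat) (hK : 1 ≤ K) :
    pvSlidingWindow l K
      = (List.range (l.length + 1 - K)).map (fun i => (l.drop i).take K) := by
  unfold pvSlidingWindow
  rw [pvSWA]
  rw [List.length_drop]
  rw [show l.length - (K - 1) = l.length + 1 - K by omega]
  apply List.map_congr_left
  intro i hi
  rw [List.mem_range] at hi
  have hiK : K + i ≤ l.length := by omega
  have h1 : l.take (K - 1) ++ (l.drop (K - 1)).take (i + 1) = l.take (K + i) := by
    rw [show K + i = (K - 1) + (i + 1) by omega]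
    exact (List.take_add).symm
  rw [h1]
  have hlen : (l.take (K + i)).length = K + i := by
    rw [List.length_take]; omega
  rw [hlen, show K + i - K = i by omega, List.drop_take]
  congr 1
  omega

lemma pvEnumMapRange (f : Nat → List Char) (W : Nat) : ∀ (s : Int),
    PySem.List.enumerate ((List.range W).map f) s
      = (List.range W).map (fun i : Nat => ((s + (i : Int), f i) : Int × List Char)) := by
  induction W with
  | zero => intro s; simp [PySem.List.enumerate_nil]
  | succ W ih =>
    intro s
    rw [List.range_succ, List.map_append, List.map_append]
    rw [PySem.List.enumerate_append, ih]
    simp [PySem.List.enumerate_cons, PySem.List.enumerate_nil]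

-- run-length lemmas
lemma pvTakeWhileLe {α : Type} (p : α → Bool) (q : List α) (n : Nat) :
    n ≤ (q.takeWhile p).length ↔ n ≤ q.length ∧ (q.take n).all p := by
  induction q generalizing n with
  | nil => simp
  | cons x xs ih =>
    cases n with
    | zero => simp
    | succ m =>
      rw [List.takeWhile_cons]
      by_cases hp : p x = true
      · simp [hp, ih]
      · simp [hp]

lemma pvRunLe (p : List Char) (n : Nat) :
    n ≤ pvRun p ↔ n ≤ p.length ∧ (p.drop (p.length - n)).all pvGood := by
  unfold pvRun
  rw [pvTakeWhileLe, pvRtakeEq, List.all_reverse, List.length_reverse]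

lemma pvRunSnoc (p : List Char) (x : Char) :
    pvRun (p ++ [x]) = if pvGood x then pvRun p + 1 else 0 := by
  unfold pvRun
  rw [List.reverse_append]
  simp [List.takeWhile_cons]
  by_cases hx : pvGood x = true <;> simp [hx]

lemma pvReindex (M N : Nat) (C : Nat → Bool) (g : Nat → Int)
    (hC : ∀ j, C j = true → N ≤ j) :
    ((List.range M).filter C).map g
      = ((List.range (M - N)).filter (fun i => C (i + N))).map (fun i => g (i + N)) := by
  by_cases h : N ≤ M
  · conv_lhs => rw [show M = N + (M - N) by omega, List.range_add]
    rw [List.filter_append]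
    have h1 : (List.range N).filter C = [] := by
      rw [List.filter_eq_nil_iff]
      intro j hj hCj
      rw [List.mem_range] at hj
      exact absurd (hC j hCj) (by omega)
    rw [h1, List.nil_append, List.filter_map, List.map_map]
    rw [List.filter_congr (l := List.range (M - N))
        (q := fun i => C (i + N)) (fun i _ => by simp [Function.comp, Nat.add_comm])]
    apply List.map_congr_left
    intro i _
    simp [Nat.add_comm]
  · have h1 : (List.range M).filter C = [] := by
      rw [List.filter_eq_nil_iff]
      intro j hj hCj
      rw [List.mem_range] at hj
      exact absurd (hC j hCj) (by omega)
    rw [h1, show M - N = 0 by omega]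
    simp

-- A's fold equals the canonical list
lemma pvACanon (l : List Char) (n : Int) (hn : 0 ≤ n) :
    (PySem.List.enumerate (pvSlidingWindow l ((n + 1).toNat))).foldl
      (fun acc iw =>
        if (iw.2.dropLast.all (fun c => c == '?' || c == '#')
            && (PySem.List.pyGetD iw.2 (-1) ' ' != '#')) then
          acc ++ [iw.1 + n + 1]
        else acc) []
      = pvCanon l n.toNat := by
  have hK : (n + 1).toNat = n.toNat + 1 := by omega
  rw [hK, pvWindows l (n.toNat + 1) (by omega), pvEnumMapRange, List.foldl_map]
  refine Eq.trans
    (PySem.List.foldl_append_if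
      (fun i : Nat =>
        (((l.drop i).take (n.toNat + 1)).dropLast.all (fun c => c == '?' || c == '#')
          && (PySem.List.pyGetD ((l.drop i).take (n.toNat + 1)) (-1) ' ' != '#')))
      (fun i : Nat => 0 + (i : Int) + n + 1)
      (List.range (l.length + 1 - (n.toNat + 1))) []) ?_
  rw [List.nil_append]
  unfold pvCanon
  rw [pvReindex l.length n.toNat (pvCond l n.toNat) (fun j : Nat => (j : Int) + 1)
      (fun j hj => by simp [pvCond] at hj; omega)]
  rw [show l.length + 1 - (n.toNat + 1) = l.length - n.toNat by omega]
  refine Eq.trans (congrArg (List.map _) (List.filter_congr ?_)) (List.map_congr_left ?_)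
  · intro i hi
    rw [List.mem_range] at hi
    have hiN : i + n.toNat < l.length := by omega
    have hw : ((l.drop i).take (n.toNat + 1)).length = n.toNat + 1 := by
      simp [List.length_take, List.length_drop]; omega
    have hne : (l.drop i).take (n.toNat + 1) ≠ [] := by
      intro h; rw [h] at hw; simp at hw
    have hdrop : ((l.drop i).take (n.toNat + 1)).dropLast = (l.drop i).take n.toNat := by
      rw [List.dropLast_eq_take, hw, List.take_take]
      congr 1; omega
    have hlast : PySem.List.pyGetD ((l.drop i).take (n.toNat + 1)) (-1) ' '
        = l[i + n.toNat]'hiN := by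
      rw [PySem.List.pyGetD_neg_one _ ' ' hne, List.getLast_eq_getElem]
      simp only [hw, Nat.add_sub_cancel, List.getElem_take, List.getElem_drop]
    rw [hdrop, hlast]
    unfold pvCond
    simp only [Nat.add_sub_cancel, Nat.le_add_left, decide_true, Bool.true_and,
      List.getD_eq_getElem l ' ' hiN]
    rfl
  · intro i hi
    have hni : ((n.toNat : Int)) = n := Int.toNat_of_nonneg hn
    push_cast [hni]
    ring

-- the Bool test B evaluates at position a equals the canonical condition
lemma pvCondEq (l : List Char) (n : Int) (hn : 0 ≤ n) (a : Nat) (haL : a < l.length) :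
    (decide (n ≤ (a : Int)) && decide (n ≤ (pvRun (l.take a) : Int))
      && (l[a]'haL != '#')) = pvCond l n.toNat a := by
  have hrunlen : (l.take a).length = a := by simp [List.length_take]; omega
  by_cases hNa : n.toNat ≤ a
  · have h1 : decide (n ≤ (a : Int)) = true := by simp; omega
    have hiff := pvRunLe (l.take a) n.toNat
    rw [hrunlen] at hiff
    have hseg : (l.take a).drop (a - n.toNat) = (l.drop (a - n.toNat)).take n.toNat := by
      rw [List.drop_take]; congr 1; omega
    rw [hseg] at hiff
    have h2 : decide (n ≤ (pvRun (l.take a) : Int))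
        = ((l.drop (a - n.toNat)).take n.toNat).all pvGood := by
      by_cases h3 : ((l.drop (a - n.toNat)).take n.toNat).all pvGood = true
      · have := hiff.mpr ⟨hNa, h3⟩
        simp [h3]; omega
      · simp only [h3, decide_eq_false_iff_not]
        intro hle
        exact h3 (hiff.mp (by omega)).2
    unfold pvCond
    rw [h1, h2, List.getD_eq_getElem l ' ' haL]
    simp [hNa]
  · have h0 : ¬ (n ≤ (a : Int)) := by omega
    unfold pvCond
    simp [h0, hNa]

lemma pvBFold (l : List Char) (n : Int) (hn : 0 ≤ n) (lookup : Int → Char)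
    (hlook : ∀ j : Nat, j < l.length → lookup (j : Int) = l.getD j ' ') :
    ∀ (b a : Nat) (acc : List Int), a + b = l.length →
    ((PySem.List.pyRange (a : Int) (l.length : Int) 1).foldl
      (fun st j =>
        let c : Char := lookup j
        let acc := if n ≤ j && n ≤ st.1 && c != '#' then st.2 ++ [j + 1] else st.2
        ((if c == '?' || c == '#' then st.1 + 1 else 0), acc))
      (((pvRun (l.take a)) : Int), acc)).2
      = acc ++ ((List.range' a b).filter (pvCond l n.toNat)).map (fun j : Nat => (j : Int) + 1) := by
  intro b
  induction b with
  | zero =>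
    intro a acc ha
    rw [PySem.List.pyRange_one_eq_nil (by exact_mod_cast (by omega : l.length ≤ a))]
    simp
  | succ b ih =>
    intro a acc ha
    have haL : a < l.length := by omega
    rw [PySem.List.pyRange_one_cons (by exact_mod_cast haL), List.foldl_cons]
    have hc : lookup (a : Int) = l[a]'haL := by
      rw [hlook a haL, List.getD_eq_getElem l ' ' haL]
    have hrun : (if l[a]'haL == '?' || l[a]'haL == '#'
          then ((pvRun (l.take a) : Int)) + 1 else 0)
        = ((pvRun (l.take (a + 1)) : Int)) := by
      rw [List.take_succ_eq_append_getElem haL, pvRunSnoc]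
      by_cases hx : pvGood (l[a]'haL) = true
      · rw [if_pos hx, if_pos (by simpa [pvGood] using hx)]
        push_cast; ring
      · rw [if_neg (by simp [pvGood] at hx ⊢; tauto), if_neg hx]
        simp
    simp only [] at ih ⊢
    rw [hc, hrun, pvCondEq l n hn a haL]
    have hcast : (PySem.List.pyRange ((a : Int) + 1) (l.length : Int) 1)
        = PySem.List.pyRange ((a + 1 : Nat) : Int) (l.length : Int) 1 := by
      norm_num
    rw [hcast, ih (a + 1) _ (by omega), List.range'_succ, List.filter_cons]
    by_cases hcnd : pvCond l n.toNat a = true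
    · rw [if_pos hcnd, if_pos hcnd, List.map_cons, List.append_assoc]
      rfl
    · rw [if_neg (by simp [hcnd]), if_neg (by simp [hcnd])]

-- B's fold equals the canonical list
lemma pvBCanon (l : List Char) (n : Int) (hn : 0 ≤ n) (lookup : Int → Char)
    (hlook : ∀ j : Nat, j < l.length → lookup (j : Int) = l.getD j ' ') :
    ((PySem.List.pyRange 0 (l.length : Int) 1).foldl
      (fun st j =>
        let c : Char := lookup j
        let acc := if n ≤ j && n ≤ st.1 && c != '#' then st.2 ++ [j + 1] else st.2
        ((if c == '?' || c == '#' then st.1 + 1 else 0), acc))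
      ((0 : Int), ([] : List Int))).2
      = pvCanon l n.toNat := by
  have h := pvBFold l n hn lookup hlook l.length 0 [] (by omega)
  simp only [Nat.cast_zero, List.take_zero] at h
  rw [show ((pvRun [] : Int)) = 0 from rfl] at h
  rw [h, List.nil_append, ← List.range_eq_range']
  rfl

-- ===== VERDICT (by name: the statement is the Claim_ definition above) =====
theorem get_valid_first_ends_spec : Claim_equal_get_valid_first_ends := by
  intro seq n _ hpre
  unfold Pre_get_valid_first_ends at hpre
  unfold Spec_get_valid_first_ends
  unfold get_valid_first_ends get_valid_first_ends_alt
  simp only []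
  by_cases hL : ((seq.toList.length : Int) = n)
  · rw [if_pos hL, if_pos hL, hL]
  · rw [if_neg hL, if_neg hL]
    set cs : List Char := seq.toList with hcs
    set f : Int := PySem.Str.find seq "#" with hf
    set index : Int := if f = -1 then (cs.length : Int) else f + n with hindex
    have hfl : -1 ≤ f := by
      rw [hf]
      simpa using PySem.Chars.neg_one_le_find seq.toList "#".toList
    have hfle : f ≤ (cs.length : Int) := by
      rw [hf, hcs]
      simpa using PySem.Chars.find_le_length seq.toList "#".toList
    have hlen0 : (0 : Int) ≤ (cs.length : Int) := Int.natCast_nonneg _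
    have hidx0 : 0 ≤ index := by
      rw [hindex]
      split_ifs with h
      · exact hlen0
      · omega
    set m : Int := min (index + 1) ((cs.length : Int) + 1) with hm
    have hm0 : 0 ≤ m := by omega
    set M : Nat := m.toNat with hM
    have hmM : m = (M : Int) := (Int.toNat_of_nonneg hm0).symm
    set l : List Char := (cs ++ ['.']).take M with hl
    have hlenl : l.length = M := by
      rw [hl]
      simp only [List.length_take, List.length_append, List.length_cons, List.length_nil]
      omega
    have hslice : PySem.List.slice (if (cs.length : Int) ≤ index then cs ++ ['.'] else cs)
        none (some (index + 1)) = l := by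
      by_cases hca : (cs.length : Int) ≤ index
      · rw [if_pos hca, PySem.List.slice_to (cs ++ ['.']) (by omega), hl]
        rw [List.take_of_length_le (by simp; omega), List.take_of_length_le (by simp; omega)]
      · rw [if_neg hca, PySem.List.slice_to cs (by omega), hl]
        rw [List.take_append_of_le_length (by omega : M ≤ cs.length)]
        rw [show (index + 1).toNat = M by omega]
    rw [hslice, pvACanon l n hpre]
    have hlook : ∀ j : Nat, j < l.length →
        (fun j : Int => if j < (cs.length : Int) then PySem.List.pyGetD cs j ' ' else '.') (j : Int)
          = l.getD j ' ' := by
      intro j hj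
      rw [hlenl] at hj
      show (if (j : Int) < (cs.length : Int) then PySem.List.pyGetD cs (j : Int) ' ' else '.')
          = l.getD j ' '
      have hj' : j < l.length := by omega
      by_cases hjL : j < cs.length
      · rw [if_pos (by exact_mod_cast hjL), PySem.List.pyGetD_natCast]
        rw [List.getD_eq_getElem l ' ' hj', List.getD_eq_getElem cs ' ' hjL]
        simp only [hl, List.getElem_take]
        exact (List.getElem_append_left hjL).symm
      · have hjeq : j = cs.length := by omega
        rw [if_neg (by exact_mod_cast hjL)]
        rw [List.getD_eq_getElem l ' ' hj']
        simp only [hl, List.getElem_take]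
        subst hjeq
        exact (List.getElem_concat_length rfl (by simp)).symm
    have hB := pvBCanon l n hpre
      (fun j : Int => if j < (cs.length : Int) then PySem.List.pyGetD cs j ' ' else '.') hlook
    rw [hlenl] at hB
    simp only [] at hB
    rw [hmM]
    exact hB.symm
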